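-- pv_equiv track=rewrite | github.com/21S003018/FL-AGCNS | rl.py | createShape
-- ===== SOURCE A (Python) =====
-- def createShape(raw):
--     """
--     produce shape automatically
--     raw: [1,2,3] choices list
--     """
--     shape = []
--     number = 1
--     for i in raw:
--         item = [number, i]
--         number = number*i
--         shape.append(item)
--     return shape
-- ===== SOURCE B (Python) =====
-- def createShape(raw):
--     if len(raw) <= 1:
--         return [[1, raw[0]]] if raw else []
--     mid = len(raw) // 2
--     left = createShape(raw[:mid])
--     right = createShape(raw[mid:])
--     p = left[-1][0] * left[-1][1]   # product of the left half
--     return left + [[p * n, i] for n, i in right]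
-- ===== Notes on version B (the rewrite author's own statement) =====
-- stated objective: alternative
-- what changed: B computes the shape by divide-and-conquer: it splits raw in half, recursively builds each half's shape, and rescales the right half's running products by the left half's total product (read off the left result's last entry), instead of A's single left-to-right pass with an accumulator.
import Mathlib
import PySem

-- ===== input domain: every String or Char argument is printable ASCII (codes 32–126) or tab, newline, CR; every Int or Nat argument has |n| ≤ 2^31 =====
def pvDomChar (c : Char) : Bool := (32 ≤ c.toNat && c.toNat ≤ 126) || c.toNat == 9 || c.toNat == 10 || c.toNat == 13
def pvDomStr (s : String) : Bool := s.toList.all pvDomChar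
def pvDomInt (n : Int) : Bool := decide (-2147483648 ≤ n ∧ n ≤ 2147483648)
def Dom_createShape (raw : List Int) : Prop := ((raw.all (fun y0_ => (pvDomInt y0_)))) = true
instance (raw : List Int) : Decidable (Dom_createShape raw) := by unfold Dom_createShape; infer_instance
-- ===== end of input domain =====

-- B rebuilds the shape by divide-and-conquer (split, recurse, rescale the right half) instead of A's single accumulating pass; return values proved equal, no speed claim.

-- ===== PORT A =====
-- loop: for i in raw: item = [number, i]; number = number*i; shape.append(item)
def createShape (raw : List Int) : List (List Int) :=
  (raw.foldl (fun (st : List (List Int) × Int) i =>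
    (st.1 ++ [[st.2, i]], st.2 * i)) ([], 1)).1

-- ===== PORT B =====
-- Source B: if len(raw) <= 1: return [[1, raw[0]]] if raw else []
--       mid = len(raw)//2; left = createShape(raw[:mid]); right = createShape(raw[mid:])
--       p = left[-1][0] * left[-1][1]; return left + [[p*n, i] for n, i in right]
-- left[-1] is the last entry [n, i] of a nonempty left; the `_ => 0` branch is
-- unreachable (Python's unpacking would raise there; entries always have 2 elements).
def createShape_alt (raw : List Int) : List (List Int) :=
  if raw.length ≤ 1 then
    match raw with
    | [] => []
    | x :: _ => [[1, x]]
  else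
    let mid := raw.length / 2
    let left := createShape_alt (raw.take mid)
    let right := createShape_alt (raw.drop mid)
    let p := match left.getLast? with
      | some (n :: i :: _) => n * i
      | _ => 0
    left ++ right.map (fun item =>
      match item with
      | n :: i :: _ => [p * n, i]
      | _ => [])
  termination_by raw.length
  decreasing_by
  · simp [List.length_take]; omega
  · simp [List.length_drop]; omega

-- ===== PRECONDITION & SPEC =====
def Spec_createShape (raw : List Int) (out : List (List Int)) : Prop := out = createShape_alt raw
instance (raw : List Int) (out : List (List Int)) : Decidable (Spec_createShape raw out) := by unfold Spec_createShape; infer_instance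

-- ===== CLAIM (what is proved, stated in full; the proofs are below) =====
def Claim_equal_createShape : Prop := ∀ (raw : List Int), Dom_createShape raw → Spec_createShape raw (createShape raw)

-- ===== LEMMAS AND PROOFS =====

-- reference shape: S l c = [[c, l0], [c*l0, l1], …]
def pvS : List Int → Int → List (List Int)
  | [], _ => []
  | x :: xs, c => [c, x] :: pvS xs (c * x)

lemma pvA_acc (l : List Int) (acc : List (List Int)) (c : Int) :
    (l.foldl (fun (st : List (List Int) × Int) i =>
      (st.1 ++ [[st.2, i]], st.2 * i)) (acc, c)).1
    = acc ++ pvS l c := by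
  induction l generalizing acc c with
  | nil => simp [pvS]
  | cons x xs ih => simp [pvS, ih]

lemma pvS_append (l1 l2 : List Int) (c : Int) :
    pvS (l1 ++ l2) c = pvS l1 c ++ pvS l2 (c * l1.prod) := by
  induction l1 generalizing c with
  | nil => simp [pvS]
  | cons x xs ih => simp [pvS, ih, mul_assoc]

lemma pvS_scale (l : List Int) (a b : Int) :
    pvS l (a * b) = (pvS l b).map (fun item =>
      match item with
      | n :: i :: _ => [a * n, i]
      | _ => []) := by
  induction l generalizing b with
  | nil => simp [pvS]
  | cons x xs ih => simp [pvS, ← ih, mul_assoc]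

lemma pvS_getLast (l : List Int) (c : Int) (h : l ≠ []) :
    ∃ n i, (pvS l c).getLast? = some [n, i] ∧ n * i = c * l.prod := by
  induction l generalizing c with
  | nil => exact absurd rfl h
  | cons x xs ih =>
    cases xs with
    | nil => exact ⟨c, x, by simp [pvS], by simp⟩
    | cons y ys =>
      obtain ⟨n, i, h1, h2⟩ := ih (c := c * x) (by simp)
      exact ⟨n, i, by simpa [pvS] using h1, by simpa [mul_assoc] using h2⟩

lemma pvB_eq (raw : List Int) : createShape_alt raw = pvS raw 1 := by
  induction raw using (fun motive ih raw => Nat.strongRecOn (motive := fun n => ∀ l : List Int, l.length = n → motive l)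
      raw.length (fun _ ih2 l hl => ih l (fun m hm => ih2 m.length (hl ▸ hm) m rfl)) raw rfl :
      ∀ motive : List Int → Prop,
        (∀ l : List Int, (∀ m : List Int, m.length < l.length → motive m) → motive l) → ∀ l, motive l) with
  | _ raw ih =>
  rw [createShape_alt.eq_def]
  by_cases h : raw.length ≤ 1
  · simp only [h, if_true]
    match raw, h with
    | [], _ => simp [pvS]
    | [x], _ => simp [pvS]
  · simp only [h, if_false]
    have hlen : 2 ≤ raw.length := by omega
    have hm1 : (raw.take (raw.length / 2)).length < raw.length := by
      simp [List.length_take]; omega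
    have hm2 : (raw.drop (raw.length / 2)).length < raw.length := by
      simp [List.length_drop]; omega
    rw [ih _ hm1, ih _ hm2]
    have hne : raw.take (raw.length / 2) ≠ [] :=
      List.ne_nil_of_length_pos (by rw [List.length_take]; omega)
    obtain ⟨n, i, hlast, hprod⟩ := pvS_getLast (raw.take (raw.length / 2)) 1 hne
    rw [hlast]
    rw [← pvS_scale (raw.drop (raw.length / 2)) (n * i) 1]
    rw [hprod]
    have : pvS (raw.take (raw.length / 2)) 1 ++ pvS (raw.drop (raw.length / 2)) (1 * (raw.take (raw.length / 2)).prod * 1)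
        = pvS raw 1 := by
      have := pvS_append (raw.take (raw.length / 2)) (raw.drop (raw.length / 2)) 1
      simp only [List.take_append_drop] at this
      rw [this]; ring_nf
    simpa using this

-- ===== VERDICT (by name: the statement is the Claim_ definition above) =====
theorem createShape_spec : Claim_equal_createShape := by
  intro raw _
  unfold Spec_createShape createShape
  rw [pvB_eq, pvA_acc]
  simp
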